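-- pv_equiv track=rewrite | github.com/teratensor/Prediction | 3_predict/3_235/analyze_winning_ranks.py | get_frequency_ranks
-- ===== SOURCE A (Python) =====
-- from collections import Counter
--
-- def get_frequency_ranks(data, idx, n=50):
--     """최근 N회차 빈도 기준 전체 번호 순위"""
--     past_data = data[max(0, idx-n):idx]
--
--     freq = Counter()
--     for r in past_data:
--         for ball in r['balls']:
--             freq[ball] += 1
--
--     # 빈도순 정렬 (동점시 번호 오름차순)
--     sorted_nums = sorted(range(1, 46), key=lambda x: (-freq.get(x, 0), x))
--
--     # 순위 매핑
--     ranks = {num: rank+1 for rank, num in enumerate(sorted_nums)}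
--     return ranks, freq
-- ===== SOURCE B (Python) =====
-- from collections import Counter
--
-- def get_frequency_ranks(data, idx, n=50):
--     """Rank 1..45 by recent-window frequency, via frequency buckets instead of a keyed sort."""
--     start = idx - n
--     if start < 0:
--         start = 0
--     balls = [b for r in data[start:idx] for b in r['balls']]
--     freq = Counter(balls)
--
--     # group the numbers 1..45 (ascending) by their frequency
--     buckets = {}
--     for num in range(1, 46):
--         buckets.setdefault(freq.get(num, 0), []).append(num)
--
--     # walk the observed frequencies from highest to lowest, assigning ranks
--     ranks = {}
--     rank = 0
--     for f in sorted(buckets, reverse=True):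
--         for num in buckets[f]:
--             rank += 1
--             ranks[num] = rank
--     return ranks, freq
-- ===== Notes on version B (the rewrite author's own statement) =====
-- stated objective: alternative
-- what changed: The nested Counter loop becomes Counter over one flattened comprehension, and the comparison sort with a (-freq, num) tuple key is replaced by frequency buckets: group 1..45 by their count into a dict, walk the observed frequencies from highest to lowest, and assign ranks with a running counter instead of enumerate over a sorted list.
import Mathlib
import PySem

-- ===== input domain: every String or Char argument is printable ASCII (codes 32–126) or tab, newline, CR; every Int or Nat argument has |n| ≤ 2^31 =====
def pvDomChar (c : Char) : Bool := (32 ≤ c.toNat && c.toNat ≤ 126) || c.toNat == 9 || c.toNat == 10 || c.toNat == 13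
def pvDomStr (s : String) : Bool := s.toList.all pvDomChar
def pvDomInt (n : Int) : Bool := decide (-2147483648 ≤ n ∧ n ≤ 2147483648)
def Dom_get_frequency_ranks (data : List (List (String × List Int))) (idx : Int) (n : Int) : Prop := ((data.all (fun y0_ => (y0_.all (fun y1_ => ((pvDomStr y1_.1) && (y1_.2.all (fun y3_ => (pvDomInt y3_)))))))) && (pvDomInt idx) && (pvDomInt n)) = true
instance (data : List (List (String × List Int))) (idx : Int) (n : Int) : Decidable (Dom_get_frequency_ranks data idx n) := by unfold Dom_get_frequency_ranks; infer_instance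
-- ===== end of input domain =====

-- B replaces the keyed sort of 1..45 with frequency buckets walked from the highest frequency down (alternative decomposition).

-- ===== PORT A =====
-- r['balls'] : KeyError when the key is missing -> getD with [] here; Pre_ excludes that input.
def get_frequency_ranks (data : List (List (String × List Int))) (idx : Int) (n : Int) : (List (Int × Int)) × (List (Int × Int)) :=
  let past_data := PySem.List.slice data (some (max 0 (idx - n))) (some idx)
  let freq : PySem.Dict Int Int :=
    past_data.foldl (fun f r =>
      (PySem.Dict.getD (PySem.Dict.mk r) "balls" []).foldl
        (fun f ball => PySem.Dict.modify f ball 0 (fun v => v + 1)) f) PySem.Dict.empty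
  let sorted_nums := PySem.List.sorted2 (PySem.List.pyRange 1 46 1)
      (fun x => -(PySem.Dict.getD freq x 0)) (fun x => x) false
  let ranks := (PySem.List.enumerate sorted_nums 0).foldl
      (fun d p => PySem.Dict.insert d p.2 (p.1 + 1)) (PySem.Dict.empty : PySem.Dict Int Int)
  (ranks.items, freq.items)

-- ===== PORT B =====
-- r['balls'] : KeyError when the key is missing -> getD with [] here; Pre_ excludes that input.
-- buckets[f] in the walk is getD with []: f is always a key of buckets (it comes from sorted(buckets)).
def get_frequency_ranks_alt (data : List (List (String × List Int))) (idx : Int) (n : Int) : (List (Int × Int)) × (List (Int × Int)) :=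
  let start := if idx - n < 0 then (0 : Int) else idx - n
  let balls := (PySem.List.slice data (some start) (some idx)).flatMap
      (fun r => PySem.Dict.getD (PySem.Dict.mk r) "balls" [])
  let freq : PySem.Dict Int Int := PySem.Dict.counter balls
  let buckets : PySem.Dict Int (List Int) :=
    (PySem.List.pyRange 1 46 1).foldl
      (fun b num => PySem.Dict.modify b (PySem.Dict.getD freq num 0) [] (fun l => l ++ [num]))
      PySem.Dict.empty
  let ranks := ((PySem.List.sorted buckets.keys (fun f => f) true).foldl
      (fun st f => (PySem.Dict.getD buckets f []).foldl
        (fun st2 num => (PySem.Dict.insert st2.1 num (st2.2 + 1), st2.2 + 1)) st)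
      ((PySem.Dict.empty : PySem.Dict Int Int), (0 : Int))).1
  (ranks.items, freq.items)

-- ===== PRECONDITION & SPEC =====
-- Pre_ excludes exactly the inputs where A raises KeyError: a row of the sliced window without the key "balls".
def Pre_get_frequency_ranks (data : List (List (String × List Int))) (idx : Int) (n : Int) : Prop :=
  ∀ r ∈ PySem.List.slice data (some (max 0 (idx - n))) (some idx), (PySem.Dict.mk r).contains "balls" = true
instance (data : List (List (String × List Int))) (idx : Int) (n : Int) : Decidable (Pre_get_frequency_ranks data idx n) := by unfold Pre_get_frequency_ranks; infer_instance
def pvWitness_get_frequency_ranks : (List (List (String × List Int))) × Int × Int := ([[("balls", [7, 12, 12])]], 1, 50)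
def Spec_get_frequency_ranks (data : List (List (String × List Int))) (idx : Int) (n : Int) (out : (List (Int × Int)) × (List (Int × Int))) : Prop := out = get_frequency_ranks_alt data idx n
instance (data : List (List (String × List Int))) (idx : Int) (n : Int) (out : (List (Int × Int)) × (List (Int × Int))) : Decidable (Spec_get_frequency_ranks data idx n out) := by unfold Spec_get_frequency_ranks; infer_instance

-- ===== CLAIM (what is proved, stated in full; the proofs are below) =====
def Claim_equal_get_frequency_ranks : Prop := ∀ (data : List (List (String × List Int))) (idx : Int) (n : Int), Dom_get_frequency_ranks data idx n → Pre_get_frequency_ranks data idx n → Spec_get_frequency_ranks data idx n (get_frequency_ranks data idx n)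

-- ===== LEMMAS AND PROOFS =====

-- A's double Counter loop is Counter of the concatenated ball lists (= B's flat comprehension).
lemma pv_freq_eq (past : List (List (String × List Int))) :
    past.foldl (fun f r =>
      (PySem.Dict.getD (PySem.Dict.mk r) "balls" []).foldl
        (fun f ball => PySem.Dict.modify f ball 0 (fun v => v + 1)) f) PySem.Dict.empty
      = PySem.Dict.counter (past.flatMap (fun r => PySem.Dict.getD (PySem.Dict.mk r) "balls" [])) := by
  rw [PySem.Dict.counter_eq_foldl, List.flatMap_def, List.foldl_flatten, List.foldl_map]

-- B's pre-incremented running-rank step computes A's enumerate-based rank dict over the same sequence.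
lemma pv_ranks_fold (l : List Int) (d : PySem.Dict Int Int) (s : Int) :
    (PySem.List.enumerate l s).foldl (fun d p => PySem.Dict.insert d p.2 (p.1 + 1)) d
      = (l.foldl (fun st num => (PySem.Dict.insert st.1 num (st.2 + 1), st.2 + 1)) (d, s)).1 := by
  induction l generalizing d s with
  | nil => rfl
  | cons x t ih =>
      rw [PySem.List.enumerate_cons]
      simp only [List.foldl_cons]
      simpa using ih (PySem.Dict.insert d x (s + 1)) (s + 1)

-- The bucket of frequency f holds exactly the numbers of range(1, 46) with that frequency, ascending.
lemma pv_buckets_getD (d : PySem.Dict Int Int) (f : Int) :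
    ((PySem.List.pyRange 1 46 1).foldl
        (fun b num => PySem.Dict.modify b (PySem.Dict.getD d num 0) [] (fun l => l ++ [num]))
        (PySem.Dict.empty : PySem.Dict Int (List Int))).getD f []
      = (PySem.List.pyRange 1 46 1).filter (fun x => PySem.Dict.getD d x 0 == f) := by
  have h : (PySem.List.pyRange 1 46 1).foldl
        (fun b num => PySem.Dict.modify b (PySem.Dict.getD d num 0) [] (fun l => l ++ [num]))
        (PySem.Dict.empty : PySem.Dict Int (List Int))
      = ((PySem.List.pyRange 1 46 1).map (fun num => (PySem.Dict.getD d num 0, num))).foldl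
        (fun b p => PySem.Dict.modify b p.1 [] (fun l => l ++ [p.2])) PySem.Dict.empty := by
    rw [List.foldl_map]
  rw [h, PySem.Dict.getD_foldl_modify_append, PySem.Dict.getD_empty, List.nil_append,
      List.filter_map, List.map_map]
  simp [Function.comp_def]

-- The bucket keys are the distinct observed frequencies of 1..45, in first-occurrence order.
lemma pv_buckets_keys (d : PySem.Dict Int Int) :
    ((PySem.List.pyRange 1 46 1).foldl
        (fun b num => PySem.Dict.modify b (PySem.Dict.getD d num 0) [] (fun l => l ++ [num]))
        (PySem.Dict.empty : PySem.Dict Int (List Int))).keys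
      = PySem.Set.ofList ((PySem.List.pyRange 1 46 1).map (fun x => PySem.Dict.getD d x 0)) := by
  rw [PySem.Dict.keys_foldl_modify_key, PySem.Dict.keys_empty, PySem.Set.update_nil_left]

lemma pv_buckets_nodup (d : PySem.Dict Int Int) :
    ((PySem.List.pyRange 1 46 1).foldl
        (fun b num => PySem.Dict.modify b (PySem.Dict.getD d num 0) [] (fun l => l ++ [num]))
        (PySem.Dict.empty : PySem.Dict Int (List Int))).keys.Nodup := by
  rw [pv_buckets_keys]
  exact PySem.Set.nodup_ofList _

-- sorted(ks, reverse=True) of a duplicate-free key list is strictly decreasing.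
lemma pv_sorted_keys_desc (ks : List Int) (hnd : ks.Nodup) :
    (PySem.List.sorted ks (fun f => f) true).Pairwise (fun f g => g < f) := by
  have h1 := PySem.List.sorted_pairwise_rev ks (fun f => f)
  have h2 : (PySem.List.sorted ks (fun f => f) true).Nodup :=
    ((PySem.List.sorted_perm ks (fun f => f) true).nodup_iff).2 hnd
  exact (h1.and h2).imp (fun h => lt_of_le_of_ne h.1 h.2.symm)

-- insertBy only compares the inserted element with list members.
lemma pv_insertBy_congr {α : Type} (lt1 lt2 : α → α → Bool) (P : α → Prop)
    (hag : ∀ a b, P a → P b → lt1 a b = lt2 a b) (x : α) (hx : P x) :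
    ∀ (acc : List α), (∀ a ∈ acc, P a) →
      PySem.List.insertBy lt1 x acc = PySem.List.insertBy lt2 x acc
  | [], _ => rfl
  | y :: ys, hacc => by
      have hy : P y := hacc y (by simp)
      rw [show PySem.List.insertBy lt1 x (y :: ys)
            = if lt1 x y then x :: y :: ys else y :: PySem.List.insertBy lt1 x ys from rfl,
          show PySem.List.insertBy lt2 x (y :: ys)
            = if lt2 x y then x :: y :: ys else y :: PySem.List.insertBy lt2 x ys from rfl,
          hag x y hx hy,
          pv_insertBy_congr lt1 lt2 P hag x hx ys (fun a ha => hacc a (by simp [ha]))]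

lemma pv_foldl_insertBy_congr {α : Type} (lt1 lt2 : α → α → Bool) (P : α → Prop)
    (hag : ∀ a b, P a → P b → lt1 a b = lt2 a b) :
    ∀ (xs acc : List α), (∀ x ∈ xs, P x) → (∀ a ∈ acc, P a) →
      xs.foldl (fun acc x => PySem.List.insertBy lt1 x acc) acc
        = xs.foldl (fun acc x => PySem.List.insertBy lt2 x acc) acc
  | [], _, _, _ => rfl
  | x :: xs, acc, hxs, hacc => by
      have hx : P x := hxs x (by simp)
      simp only [List.foldl_cons]
      rw [pv_insertBy_congr lt1 lt2 P hag x hx acc hacc]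
      exact pv_foldl_insertBy_congr lt1 lt2 P hag xs _
        (fun a ha => hxs a (by simp [ha]))
        (fun a ha => ((PySem.List.mem_insertBy lt2 x a acc).1 ha).elim
          (fun h => h ▸ hx) (fun h => hacc a h))

-- Python's lexicographic tuple comparison (-u, a) < (-v, b) as a single scalar key, for 1 ≤ a,b ≤ 45.
lemma pv_agree (u v a b : Int) (ha1 : 1 ≤ a) (ha2 : a ≤ 45) (hb1 : 1 ≤ b) (hb2 : b ≤ 45) :
    (decide (u < v) || (!decide (v < u) && decide (a < b)))
      = decide (u * 46 + a < v * 46 + b) := by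
  by_cases h1 : u < v <;> by_cases h2 : v < u <;> by_cases h3 : a < b <;>
    simp [h1, h2, h3] <;> omega

lemma pv_nums_pairwise : (PySem.List.pyRange 1 46 1).Pairwise (· < ·) := by
  rw [PySem.List.pyRange_one]
  rw [List.pairwise_map]
  exact List.pairwise_lt_range.imp (by omega)

lemma pv_sum_indicator (c : Int) (m : Nat) :
    ∀ (fs : List Int), fs.Nodup →
      (fs.map (fun f => if c = f then m else 0)).sum = if c ∈ fs then m else 0
  | [], _ => by simp
  | f :: fs, h => by
      have htail := pv_sum_indicator c m fs h.of_cons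
      by_cases hc : c = f
      · subst hc
        have : c ∉ fs := (List.nodup_cons.1 h).1
        simp [this, htail]
      · simp [hc, htail]

-- The bucket walk over any duplicate-free frequency list covering all observed frequencies
-- is a permutation of range(1, 46).
lemma pv_perm (d : PySem.Dict Int Int) (fs : List Int) (hnd : fs.Nodup)
    (hmem : ∀ a ∈ PySem.List.pyRange 1 46 1, PySem.Dict.getD d a 0 ∈ fs) :
    (fs.flatMap (fun f => (PySem.List.pyRange 1 46 1).filter (fun x => PySem.Dict.getD d x 0 == f))).Perm
      (PySem.List.pyRange 1 46 1) := by
  rw [List.perm_iff_count]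
  intro a
  rw [List.flatMap_def, List.count_flatten, List.map_map]
  by_cases ha : a ∈ PySem.List.pyRange 1 46 1
  · have hterm : ∀ f : Int,
        List.count a ((PySem.List.pyRange 1 46 1).filter (fun x => PySem.Dict.getD d x 0 == f))
          = if PySem.Dict.getD d a 0 = f then List.count a (PySem.List.pyRange 1 46 1) else 0 := by
      intro f
      by_cases h : PySem.Dict.getD d a 0 = f
      · rw [if_pos h, List.count_filter (by simpa using h)]
      · rw [if_neg h]
        refine List.count_eq_zero.2 (fun hmem' => h ?_)
        simpa using (List.mem_filter.1 hmem').2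
    calc (fs.map (List.count a ∘ fun f => (PySem.List.pyRange 1 46 1).filter
            (fun x => PySem.Dict.getD d x 0 == f))).sum
        = (fs.map (fun f => if PySem.Dict.getD d a 0 = f
            then List.count a (PySem.List.pyRange 1 46 1) else 0)).sum := by
          apply congrArg
          apply List.map_congr_left
          intro f _
          exact hterm f
      _ = if PySem.Dict.getD d a 0 ∈ fs
            then List.count a (PySem.List.pyRange 1 46 1) else 0 := pv_sum_indicator _ _ fs hnd
      _ = List.count a (PySem.List.pyRange 1 46 1) := if_pos (hmem a ha)
  · have h0 : List.count a (PySem.List.pyRange 1 46 1) = 0 := List.count_eq_zero.2 ha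
    rw [h0]
    have hz : ∀ f ∈ fs, (List.count a ∘ fun f => (PySem.List.pyRange 1 46 1).filter
        (fun x => PySem.Dict.getD d x 0 == f)) f = 0 := by
      intro f _
      exact List.count_eq_zero.2 (fun h => ha (List.mem_of_mem_filter h))
    rw [List.map_congr_left hz]
    simp

-- The bucket walk over a strictly decreasing frequency list is strictly increasing
-- under the scalar key -freq*46 + num.
lemma pv_pairwise (d : PySem.Dict Int Int) (fs : List Int)
    (hdesc : fs.Pairwise (fun f g => g < f)) :
    (fs.flatMap (fun f => (PySem.List.pyRange 1 46 1).filter (fun x => PySem.Dict.getD d x 0 == f))).Pairwise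
      (fun a b => -(PySem.Dict.getD d a 0) * 46 + a < -(PySem.Dict.getD d b 0) * 46 + b) := by
  rw [List.flatMap_def, List.pairwise_flatten]
  refine ⟨?_, ?_⟩
  · intro l hl
    obtain ⟨f, _, rfl⟩ := List.mem_map.1 hl
    refine List.Pairwise.imp_of_mem ?_ (pv_nums_pairwise.sublist List.filter_sublist)
    intro a b ha hb hab
    have hfa : PySem.Dict.getD d a 0 = f := by simpa using (List.mem_filter.1 ha).2
    have hfb : PySem.Dict.getD d b 0 = f := by simpa using (List.mem_filter.1 hb).2
    omega
  · rw [List.pairwise_map]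
    refine hdesc.imp_of_mem ?_
    intro f g _ _ hgf x hx y hy
    have hx' := List.mem_filter.1 hx
    have hy' := List.mem_filter.1 hy
    have hfx : PySem.Dict.getD d x 0 = f := by simpa using hx'.2
    have hfy : PySem.Dict.getD d y 0 = g := by simpa using hy'.2
    have hxr := PySem.List.mem_pyRange_one.1 hx'.1
    have hyr := PySem.List.mem_pyRange_one.1 hy'.1
    omega

-- sorted(range(1,46), key=lambda x: (-freq.get(x,0), x)) equals the bucket walk.
lemma pv_order_eq (d : PySem.Dict Int Int) (fs : List Int) (hnd : fs.Nodup)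
    (hdesc : fs.Pairwise (fun f g => g < f))
    (hmem : ∀ a ∈ PySem.List.pyRange 1 46 1, PySem.Dict.getD d a 0 ∈ fs) :
    PySem.List.sorted2 (PySem.List.pyRange 1 46 1)
        (fun x => -(PySem.Dict.getD d x 0)) (fun x => x) false
      = fs.flatMap (fun f => (PySem.List.pyRange 1 46 1).filter (fun x => PySem.Dict.getD d x 0 == f)) := by
  have hsorted := PySem.List.sorted_eq_of_perm_of_pairwise_lt
    (PySem.List.pyRange 1 46 1)
    (fs.flatMap (fun f => (PySem.List.pyRange 1 46 1).filter (fun x => PySem.Dict.getD d x 0 == f)))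
    (fun x => -(PySem.Dict.getD d x 0) * 46 + x)
    (pv_perm d fs hnd hmem) (pv_pairwise d fs hdesc)
  rw [← hsorted, PySem.List.sorted_eq_foldl_insertBy]
  show List.foldl (fun acc x => PySem.List.insertBy
      (fun a b => decide (-(PySem.Dict.getD d a 0) < -(PySem.Dict.getD d b 0)) ||
        (!decide (-(PySem.Dict.getD d b 0) < -(PySem.Dict.getD d a 0)) && decide (a < b))) x acc) [] _ = _
  apply pv_foldl_insertBy_congr _ _ (fun x : Int => 1 ≤ x ∧ x ≤ 45)
  · intro a b ha hb'
    exact pv_agree (-(PySem.Dict.getD d a 0)) (-(PySem.Dict.getD d b 0)) a b ha.1 ha.2 hb'.1 hb'.2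
  · intro x hx
    have := PySem.List.mem_pyRange_one.1 hx
    omega
  · intro a ha
    exact absurd ha (List.not_mem_nil)

-- A's enumerate over the keyed sort builds the same rank dict as B's walk over the buckets.
lemma pv_ranks_eq (d : PySem.Dict Int Int) :
    (PySem.List.enumerate (PySem.List.sorted2 (PySem.List.pyRange 1 46 1)
        (fun x => -(PySem.Dict.getD d x 0)) (fun x => x) false) 0).foldl
      (fun r p => PySem.Dict.insert r p.2 (p.1 + 1)) (PySem.Dict.empty : PySem.Dict Int Int)
    = ((PySem.List.sorted ((PySem.List.pyRange 1 46 1).foldl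
          (fun b num => PySem.Dict.modify b (PySem.Dict.getD d num 0) [] (fun l => l ++ [num]))
          (PySem.Dict.empty : PySem.Dict Int (List Int))).keys (fun f => f) true).foldl
        (fun st f => (PySem.Dict.getD ((PySem.List.pyRange 1 46 1).foldl
            (fun b num => PySem.Dict.modify b (PySem.Dict.getD d num 0) [] (fun l => l ++ [num]))
            (PySem.Dict.empty : PySem.Dict Int (List Int))) f []).foldl
          (fun st2 num => (PySem.Dict.insert st2.1 num (st2.2 + 1), st2.2 + 1)) st)
        ((PySem.Dict.empty : PySem.Dict Int Int), (0 : Int))).1 := by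
  have hndk := pv_buckets_nodup d
  have hndK : (PySem.List.sorted ((PySem.List.pyRange 1 46 1).foldl
        (fun b num => PySem.Dict.modify b (PySem.Dict.getD d num 0) [] (fun l => l ++ [num]))
        (PySem.Dict.empty : PySem.Dict Int (List Int))).keys (fun f => f) true).Nodup :=
    ((PySem.List.sorted_perm _ _ _).nodup_iff).2 hndk
  have hdesc := pv_sorted_keys_desc _ hndk
  have hmem : ∀ a ∈ PySem.List.pyRange 1 46 1,
      PySem.Dict.getD d a 0 ∈ PySem.List.sorted ((PySem.List.pyRange 1 46 1).foldl
        (fun b num => PySem.Dict.modify b (PySem.Dict.getD d num 0) [] (fun l => l ++ [num]))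
        (PySem.Dict.empty : PySem.Dict Int (List Int))).keys (fun f => f) true := by
    intro a ha
    rw [PySem.List.mem_sorted, pv_buckets_keys, PySem.Set.mem_ofList]
    exact List.mem_map.2 ⟨a, ha, rfl⟩
  rw [pv_order_eq d _ hndK hdesc hmem, pv_ranks_fold]
  simp only [pv_buckets_getD]
  rw [List.flatMap_def, List.foldl_flatten, List.foldl_map]

-- ===== VERDICT (by name: the statement is the Claim_ definition above) =====
set_option maxHeartbeats 1000000 in
theorem get_frequency_ranks_spec : Claim_equal_get_frequency_ranks := by
  intro data idx n _ _
  unfold Spec_get_frequency_ranks get_frequency_ranks get_frequency_ranks_alt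
  dsimp only
  rw [show (if idx - n < 0 then (0 : Int) else idx - n) = max 0 (idx - n) from by
        rw [max_def]; split_ifs <;> omega,
      pv_freq_eq, pv_ranks_eq]
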